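-- pv_equiv track=rewrite | github.com/tb-aiap/advent-of-code | 2023/day_14.py | tilt_westwards
-- ===== SOURCE A (Python) =====
-- from collections import defaultdict
-- from typing import Iterable
--
-- ROCK = "O"
--
-- CUBE = "#"
--
-- EMPTY = "."
--
-- def tilt_westwards(row: Iterable[str]) -> list[str]:
--     """Using loops, so westward is the easiest to implement."""
--     stack = []
--     counter = defaultdict(int)
--     for pos, rock in enumerate(row):
--         if row[pos] == CUBE:
--             if ROCK in counter:
--                 stack += [ROCK] * counter[ROCK]
--             if EMPTY in counter:
--                 stack += [EMPTY] * counter[EMPTY]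
--             counter = defaultdict(int)
--             stack += [CUBE]
--         else:
--             counter[rock] += 1
--
--     if ROCK in counter:
--         stack += [ROCK] * counter[ROCK]
--     if EMPTY in counter:
--         stack += [EMPTY] * counter[EMPTY]
--
--     return stack
-- ===== SOURCE B (Python) =====
-- # B: split the row on '#' into segments, rebuild each segment as O-count then .-count, rejoin with '#'.
-- def tilt_westwards(row):
--     segments = [[]]
--     for cell in row:
--         if cell == "#":
--             segments.append([])
--         else:
--             segments[-1].append(cell)
--     rebuilt = [["O"] * seg.count("O") + ["."] * seg.count(".") for seg in segments]
--     out = rebuilt[0]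
--     for seg in rebuilt[1:]:
--         out = out + ["#"] + seg
--     return out
-- ===== Notes on version B (the rewrite author's own statement) =====
-- stated objective: simpler
-- what changed: Replaces A's running defaultdict counter with flush-on-cube logic by a split-on-'#'-into-segments pass, rebuilding each segment from its O/. counts and rejoining with '#'.
import Mathlib
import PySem

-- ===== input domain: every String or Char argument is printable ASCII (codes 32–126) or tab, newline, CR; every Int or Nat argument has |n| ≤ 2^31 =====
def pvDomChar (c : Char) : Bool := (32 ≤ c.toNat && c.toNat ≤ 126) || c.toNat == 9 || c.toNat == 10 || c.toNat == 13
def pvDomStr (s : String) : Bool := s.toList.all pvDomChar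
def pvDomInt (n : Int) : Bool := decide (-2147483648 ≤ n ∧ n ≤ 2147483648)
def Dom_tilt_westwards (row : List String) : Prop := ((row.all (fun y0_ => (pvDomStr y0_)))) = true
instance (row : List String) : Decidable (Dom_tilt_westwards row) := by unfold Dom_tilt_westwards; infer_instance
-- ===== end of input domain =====

-- B replaces A's running counter-and-flush pass with a split-on-'#' / rebuild-per-segment / rejoin decomposition (same cost, simpler).


-- ===== PORT A =====
-- the two 'if ROCK in counter'/'if EMPTY in counter' flush lines of A
def pvFlushA (stack : List String) (counter : PySem.Dict String Int) : List String :=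
  let s1 := if counter.contains "O" then stack ++ List.replicate (counter.getD "O" 0).toNat "O" else stack
  if counter.contains "." then s1 ++ List.replicate (counter.getD "." 0).toNat "." else s1

-- A's for-loop over enumerate(row) as structural recursion over the same (stack, counter) state
def pvLoopA (row : List String) (stack : List String) (counter : PySem.Dict String Int) : List String :=
  match row with
  | [] => pvFlushA stack counter
  | rock :: rest =>
    if rock == "#" then
      pvLoopA rest (pvFlushA stack counter ++ ["#"]) PySem.Dict.empty
    else
      pvLoopA rest stack (counter.modify rock 0 (· + 1))

def tilt_westwards (row : List String) : List String :=
  pvLoopA row [] PySem.Dict.empty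

-- ===== PORT B =====
-- split the row on "#" into segments (Source B's first loop)
def pvSplitCubes (row : List String) : List (List String) :=
  match row with
  | [] => [[]]
  | cell :: rest =>
    if cell == "#" then [] :: pvSplitCubes rest
    else match pvSplitCubes rest with
         | s :: others => (cell :: s) :: others
         | [] => [[cell]]

-- ["O"] * seg.count("O") + ["."] * seg.count(".")
def pvRebuild (seg : List String) : List String :=
  List.replicate (seg.count "O") "O" ++ List.replicate (seg.count ".") "."

-- Source B's second loop: out = rebuilt[0]; then out = out + ["#"] + seg
def pvJoin (segs : List (List String)) : List String :=
  match segs with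
  | [] => []
  | first :: rest => rest.foldl (fun out seg => out ++ ["#"] ++ pvRebuild seg) (pvRebuild first)

def tilt_westwards_alt (row : List String) : List String :=
  pvJoin (pvSplitCubes row)

-- ===== PRECONDITION & SPEC =====
def Spec_tilt_westwards (row : List String) (out : List String) : Prop := out = tilt_westwards_alt row
instance (row : List String) (out : List String) : Decidable (Spec_tilt_westwards row out) := by unfold Spec_tilt_westwards; infer_instance

-- ===== CLAIM (what is proved, stated in full; the proofs are below) =====
def Claim_equal_tilt_westwards : Prop := ∀ (row : List String), Dom_tilt_westwards row → Spec_tilt_westwards row (tilt_westwards row)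

-- ===== LEMMAS AND PROOFS =====

-- the counter built from the cells seen since the last '#'
def pvCounterOf (seg : List String) : PySem.Dict String Int :=
  seg.foldl (fun d x => d.modify x 0 (· + 1)) PySem.Dict.empty

lemma pvCounterOf_eq_counter (seg : List String) : pvCounterOf seg = PySem.Dict.counter seg := rfl

lemma pvCounterOf_getD (seg : List String) (v : String) :
    (pvCounterOf seg).getD v 0 = (seg.count v : Int) := by
  rw [pvCounterOf_eq_counter]; exact PySem.Dict.getD_counter seg v

lemma pvCounterOf_contains (seg : List String) (v : String) :
    (pvCounterOf seg).contains v = decide (v ∈ seg) := by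
  rw [pvCounterOf_eq_counter, PySem.Dict.contains_counter]
  simp

lemma pvCounterOf_snoc (seg : List String) (x : String) :
    (pvCounterOf seg).modify x 0 (· + 1) = pvCounterOf (seg ++ [x]) := by
  simp [pvCounterOf, List.foldl_append]

lemma pvFlushA_counterOf (stack : List String) (seg : List String) :
    pvFlushA stack (pvCounterOf seg) = stack ++ pvRebuild seg := by
  unfold pvFlushA pvRebuild
  rw [pvCounterOf_getD, pvCounterOf_getD, pvCounterOf_contains, pvCounterOf_contains]
  by_cases hO : "O" ∈ seg <;> by_cases hD : "." ∈ seg <;>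
    simp [hO, hD, List.count_eq_zero_of_not_mem, List.append_assoc]

lemma pvSplitCubes_ne_nil (row : List String) : pvSplitCubes row ≠ [] := by
  cases row with
  | nil => simp [pvSplitCubes]
  | cons c r =>
    simp only [pvSplitCubes]
    split
    · simp
    · cases h : pvSplitCubes r <;> simp

-- pvJoin with a larger first segment
lemma pvJoin_cons (s : List String) (rest : List (List String)) :
    pvJoin (s :: rest) = rest.foldl (fun out seg => out ++ ["#"] ++ pvRebuild seg) (pvRebuild s) := rfl

lemma pvFoldJoin_prefix (rest : List (List String)) (pre out : List String) :
    rest.foldl (fun out seg => out ++ ["#"] ++ pvRebuild seg) (pre ++ out)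
      = pre ++ rest.foldl (fun out seg => out ++ ["#"] ++ pvRebuild seg) out := by
  induction rest generalizing out with
  | nil => rfl
  | cons s ss ih => simp only [List.foldl_cons, List.append_assoc] at *; rw [ih]

-- main invariant: the loop with pending stack and counter-of-seg equals stack ++ join of (seg prepended to the head segment of the split)
lemma pvLoopA_eq (row : List String) (stack seg : List String) :
    pvLoopA row stack (pvCounterOf seg)
      = stack ++ pvJoin ((seg ++ (pvSplitCubes row).headI) :: (pvSplitCubes row).tail) := by
  induction row generalizing stack seg with
  | nil =>
    simp [pvLoopA, pvSplitCubes, pvJoin, pvFlushA_counterOf]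
  | cons cell rest ih =>
    by_cases hc : cell = "#"
    · have hempty : (PySem.Dict.empty : PySem.Dict String Int) = pvCounterOf [] := rfl
      simp only [pvLoopA, hc, beq_self_eq_true, if_true, hempty]
      rw [ih]
      simp only [pvSplitCubes, beq_self_eq_true, if_true, List.headI, List.tail,
        List.nil_append, pvFlushA_counterOf]
      obtain ⟨s, ss, hsplit⟩ : ∃ s ss, pvSplitCubes rest = s :: ss := by
        cases h : pvSplitCubes rest with
        | nil => exact absurd h (pvSplitCubes_ne_nil rest)
        | cons s ss => exact ⟨s, ss, rfl⟩
      rw [hsplit]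
      simp only [pvJoin_cons, List.foldl_cons]
      rw [List.append_nil, pvFoldJoin_prefix]
      simp [List.append_assoc]
    · have hbeq : (cell == "#") = false := by simp [hc]
      simp only [pvLoopA, hbeq, pvCounterOf_snoc]
      rw [ih]
      simp only [pvSplitCubes, hbeq]
      obtain ⟨s, ss, hsplit⟩ : ∃ s ss, pvSplitCubes rest = s :: ss := by
        cases h : pvSplitCubes rest with
        | nil => exact absurd h (pvSplitCubes_ne_nil rest)
        | cons s ss => exact ⟨s, ss, rfl⟩
      rw [hsplit]
      simp [List.headI, List.tail, List.append_assoc]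

-- ===== VERDICT (by name: the statement is the Claim_ definition above) =====
theorem tilt_westwards_spec : Claim_equal_tilt_westwards := by
  intro row _
  show tilt_westwards row = tilt_westwards_alt row
  unfold tilt_westwards tilt_westwards_alt
  have he : (PySem.Dict.empty : PySem.Dict String Int) = pvCounterOf [] := rfl
  have h := pvLoopA_eq row [] []
  simp only [List.nil_append] at h
  rw [he, h]
  obtain ⟨s, ss, hsplit⟩ : ∃ s ss, pvSplitCubes row = s :: ss := by
    cases hh : pvSplitCubes row with
    | nil => exact absurd hh (pvSplitCubes_ne_nil row)
    | cons s ss => exact ⟨s, ss, rfl⟩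
  rw [hsplit]
  simp [List.headI, List.tail]
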